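-- pv_equiv track=rewrite | github.com/Armando1424/Varios | HanosTowers.py | fillTowers
-- ===== SOURCE A (Python) =====
-- def fillTowers(disks):
--     castle =  {'t1':[],'t2':[],'t3':[]}
--     aux = 0
--     for x in castle.values():
--         for y in range(disks):
--             if aux!=disks:
--                 x.append(str(aux))
--                 aux= aux+1
--             else:
--                 x.append(" ")
--     return castle
-- ===== SOURCE B (Python) =====
-- def fillTowers(disks):
--     # Build t1 back-to-front: count DOWN from disks-1 to 0, then reverse;
--     # the space towers are derived from the labels (one space per label),
--     # so no shared counter and no per-item branch is needed.
--     labels = []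
--     for n in range(disks - 1, -1, -1):
--         labels.append(str(n))
--     labels.reverse()
--     spaces = [" " for _ in labels]
--     return {'t1': labels, 't2': spaces, 't3': list(spaces)}
-- ===== Notes on version B (the rewrite author's own statement) =====
-- stated objective: alternative
-- what changed: Replaced A's nested loop threading a shared saturating counter across the three towers by a back-to-front build: a countdown loop collects the labels in reverse, one reverse restores order, and the space towers are derived from the labels, eliminating the counter and the per-item branch.
import Mathlib
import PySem

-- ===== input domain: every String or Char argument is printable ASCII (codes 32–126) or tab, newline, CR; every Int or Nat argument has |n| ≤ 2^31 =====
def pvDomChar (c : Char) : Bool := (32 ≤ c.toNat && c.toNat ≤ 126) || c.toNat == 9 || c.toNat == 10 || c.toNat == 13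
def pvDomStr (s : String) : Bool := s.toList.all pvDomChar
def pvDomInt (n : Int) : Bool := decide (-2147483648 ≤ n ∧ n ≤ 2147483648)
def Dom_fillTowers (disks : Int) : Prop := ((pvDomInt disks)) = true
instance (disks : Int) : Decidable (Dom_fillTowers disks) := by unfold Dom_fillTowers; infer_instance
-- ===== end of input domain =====

-- B builds t1 back-to-front (countdown loop, then reverse) and derives the
-- space towers from the labels; objective: alternative.

-- ===== PORT A =====
-- inner `for y in range(disks)` body: state is (current tower list x, aux)
def fillStep (disks : Int) (st : List String × Int) (_y : Int) : List String × Int :=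
  if st.2 ≠ disks then (st.1 ++ [PySem.Int.toStr st.2], st.2 + 1)
  else (st.1 ++ [" "], st.2)

def fillTowers (disks : Int) : List (String × List String) :=
  let r := PySem.List.pyRange 0 disks 1
  let p1 := r.foldl (fillStep disks) ([], 0)
  let p2 := r.foldl (fillStep disks) ([], p1.2)
  let p3 := r.foldl (fillStep disks) ([], p2.2)
  [("t1", p1.1), ("t2", p2.1), ("t3", p3.1)]

-- ===== PORT B =====
def fillTowers_alt (disks : Int) : List (String × List String) :=
  let labels :=
    ((PySem.List.pyRange (disks - 1) (-1) (-1)).foldl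
      (fun acc n => acc ++ [PySem.Int.toStr n]) []).reverse
  let spaces := labels.map (fun _ => " ")
  [("t1", labels), ("t2", spaces), ("t3", spaces)]

-- ===== PRECONDITION & SPEC =====
def Spec_fillTowers (disks : Int) (out : List (String × List String)) : Prop := out = fillTowers_alt disks
instance (disks : Int) (out : List (String × List String)) : Decidable (Spec_fillTowers disks out) := by unfold Spec_fillTowers; infer_instance

-- ===== CLAIM =====
def Claim_equal_fillTowers : Prop := ∀ (disks : Int), Dom_fillTowers disks → Spec_fillTowers disks (fillTowers disks)

-- ===== LEMMAS AND PROOFS =====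

-- once aux = disks, every step appends a space and keeps aux
theorem fillStep_saturated (d : Int) (l : List Int) (acc : List String) :
    l.foldl (fillStep d) (acc, d) = (acc ++ List.replicate l.length " ", d) := by
  induction l generalizing acc with
  | nil => simp
  | cons x l ih =>
      simp only [List.foldl_cons, fillStep, ne_eq, not_true_eq_false, if_false]
      rw [ih]
      simp [List.replicate_succ]

-- while aux stays below disks, each step appends str(aux) and increments
theorem fillStep_counting (d : Int) (l : List Int) (acc : List String) (a : Int)
    (h : a + l.length ≤ d) :
    l.foldl (fillStep d) (acc, a) =
      (acc ++ (PySem.List.pyRange a (a + l.length) 1).map PySem.Int.toStr, a + l.length) := by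
  induction l generalizing acc a with
  | nil => simp [PySem.List.pyRange_one_eq_nil le_rfl]
  | cons x l ih =>
      have hlen : ((x :: l).length : Int) = (l.length : Int) + 1 := by
        simp
      have hb : a < a + ((x :: l).length : Int) := by rw [hlen]; omega
      have ha : a ≠ d := by rw [hlen] at h; omega
      simp only [List.foldl_cons, fillStep, ne_eq, ha, not_false_eq_true, if_true]
      rw [ih (acc ++ [PySem.Int.toStr a]) (a + 1) (by rw [hlen] at h; omega)]
      rw [PySem.List.pyRange_one_cons hb]
      have : a + 1 + (l.length : Int) = a + ((x :: l).length : Int) := by rw [hlen]; omega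
      rw [this]
      simp

-- appending one element per item is map
theorem foldl_append_toStr (l : List Int) (acc : List String) :
    l.foldl (fun acc n => acc ++ [PySem.Int.toStr n]) acc = acc ++ l.map PySem.Int.toStr := by
  induction l generalizing acc with
  | nil => simp
  | cons x l ih => simp [ih]

-- closed form of B: labels are str 0 .. str (disks-1) in order
theorem fillTowers_alt_eq (disks : Int) :
    fillTowers_alt disks =
      [("t1", (PySem.List.pyRange 0 disks 1).map PySem.Int.toStr),
       ("t2", List.replicate (PySem.List.pyRange 0 disks 1).length " "),
       ("t3", List.replicate (PySem.List.pyRange 0 disks 1).length " ")] := by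
  unfold fillTowers_alt
  rw [foldl_append_toStr, PySem.List.pyRange_neg_one_eq_reverse]
  have : (-1 : Int) + 1 = 0 := by omega
  rw [this]
  have : disks - 1 + 1 = disks := by omega
  rw [this]
  simp [Function.comp_def, List.map_const', PySem.List.length_pyRange_one]

-- ===== VERDICT =====
theorem fillTowers_spec : Claim_equal_fillTowers := by
  intro disks _
  unfold Spec_fillTowers fillTowers
  rw [fillTowers_alt_eq]
  by_cases hneg : disks ≤ 0
  · rw [PySem.List.pyRange_one_eq_nil (by omega)]
    simp
  · have hnn : 0 ≤ disks := by omega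
    have hlen : ((PySem.List.pyRange 0 disks 1).length : Int) = disks := by
      rw [PySem.List.length_pyRange_one]; omega
    have h1 := fillStep_counting disks (PySem.List.pyRange 0 disks 1) [] 0 (by omega)
    rw [hlen] at h1
    simp only [zero_add] at h1
    have hlenN : (PySem.List.pyRange 0 disks 1).length = disks.toNat := by
      rw [PySem.List.length_pyRange_one]; omega
    have h2 := fillStep_saturated disks (PySem.List.pyRange 0 disks 1) []
    rw [hlenN] at h2
    simp [h1, h2, fillTowers_alt_eq, hlenN]
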